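-- pv_equiv track=rewrite | github.com/subZiro/arena.tech | medium.py | a_pow_simple_n
-- ===== SOURCE A (Python) =====
-- def a_pow_simple_n(array:list):
-- 	# принимает список числел и возвращает список состоящий из
-- 	# изначального первого элемента + простые числа 2,1,0
-- 	new_array = []
-- 	new_array.append(array[0])
--
-- 	for i in range(1, len(array)):
-- 		n = array[i]
-- 		while n not in [0,1,2]:
-- 			if n%2 == 0:
-- 				new_array.append(2)
-- 				n //= 2
-- 			else:
-- 				new_array.append(1)
-- 				n -= 1
-- 		new_array.append(n)
--
-- 	return new_array
-- ===== SOURCE B (Python) =====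
-- def a_pow_simple_n(array: list):
--     # Closed form from the binary digits: for n >= 3 with LSB-first bits b0..bk,
--     # each low bit position i < k-1 contributes ([1] if set) + [2], position k-1
--     # contributes [1] if set, and the decomposition always ends in the residue 2.
--     def syms(n):
--         if n <= 2:
--             return [n]
--         bits = bin(n)[2:][::-1]          # LSB first; bits[-1] == '1'
--         k = len(bits) - 1
--         head = [s for i in range(k - 1)
--                   for s in ([1, 2] if bits[i] == '1' else [2])]
--         return head + ([1] if bits[k - 1] == '1' else []) + [2]
--     return [array[0]] + [s for n in array[1:] for s in syms(n)]
-- ===== Notes on version B (the rewrite author's own statement) =====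
-- stated objective: alternative
-- what changed: Replaces A's while-loop of repeated division/decrement per element with a closed form read directly off the element's binary digits (bin reversed): each set low bit contributes a 1 followed by a 2, each clear low bit a 2, the top-adjacent bit a lone 1 if set, plus the final residue 2, concatenated by comprehensions.
import Mathlib
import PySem

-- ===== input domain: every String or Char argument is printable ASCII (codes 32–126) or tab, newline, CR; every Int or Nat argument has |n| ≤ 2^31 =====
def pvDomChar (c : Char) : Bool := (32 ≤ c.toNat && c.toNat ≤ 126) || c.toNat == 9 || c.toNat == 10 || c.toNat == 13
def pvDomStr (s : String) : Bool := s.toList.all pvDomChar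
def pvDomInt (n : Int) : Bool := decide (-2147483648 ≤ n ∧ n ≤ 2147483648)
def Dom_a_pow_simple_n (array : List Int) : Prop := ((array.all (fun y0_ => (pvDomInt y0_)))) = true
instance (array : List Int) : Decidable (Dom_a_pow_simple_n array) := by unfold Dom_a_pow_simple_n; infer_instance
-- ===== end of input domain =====

-- B replaces A's repeated-division while loop with a closed form read off each
-- element's binary digits (objective: alternative, same cost).

-- ===== PORT A =====
-- A's while loop, with fuel making it total (n.toNat + 1 steps always suffice when 0 ≤ n;
-- fuel 0 is never reached inside Pre_, where every tail element is nonnegative).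
def pvWhileA : Nat → Int → List Int → List Int
  | 0, n, acc => acc ++ [n]
  | f + 1, n, acc =>
    if n ≠ 0 ∧ n ≠ 1 ∧ n ≠ 2 then
      if PySem.Int.mod n 2 = 0 then pvWhileA f (PySem.Int.floordiv n 2) (acc ++ [2])
      else pvWhileA f (n - 1) (acc ++ [1])
    else acc ++ [n]

def a_pow_simple_n (array : List Int) : List Int :=
  match array with
  | [] => []  -- array[0] raises IndexError in Python; excluded by Pre_
  | a0 :: rest => rest.foldl (fun acc n => pvWhileA (n.toNat + 1) n acc) [a0]

-- ===== PORT B =====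
-- port of Python's bin(n)[2:][::-1]: LSB-first list of binary digits
def pvBin : Nat → List Bool
  | 0 => []
  | n + 1 => ((n + 1) % 2 == 1) :: pvBin ((n + 1) / 2)
decreasing_by exact Nat.div_lt_self (Nat.succ_pos n) one_lt_two

-- the head + tail-bit + final-2 closed form over a given bit list (Source B's else branch)
def pvSymsCore (bits : List Bool) : List Int :=
  ((List.range (bits.length - 1 - 1)).flatMap
      (fun i => if bits.getD i false then [1, 2] else [2]))
    ++ (if bits.getD (bits.length - 1 - 1) false then [1] else [])
    ++ [2]

def pvSyms (n : Int) : List Int :=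
  if n ≤ 2 then [n] else pvSymsCore (pvBin n.toNat)

def a_pow_simple_n_alt (array : List Int) : List Int :=
  match array with
  | [] => []  -- array[0] raises IndexError in Python; excluded by Pre_
  | a0 :: rest => a0 :: rest.flatMap pvSyms

-- ===== PRECONDITION & SPEC =====
-- Pre_ excludes the empty list (A raises IndexError) and lists with a negative element
-- after the first (A's while loop never terminates there).
def Pre_a_pow_simple_n (array : List Int) : Prop :=
  array ≠ [] ∧ ∀ x ∈ array.tail, 0 ≤ x
instance (array : List Int) : Decidable (Pre_a_pow_simple_n array) := by
  unfold Pre_a_pow_simple_n; infer_instance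
def pvWitness_a_pow_simple_n : List Int := [-7, 13, 0, 6]

def Spec_a_pow_simple_n (array : List Int) (out : List Int) : Prop := out = a_pow_simple_n_alt array
instance (array : List Int) (out : List Int) : Decidable (Spec_a_pow_simple_n array out) := by unfold Spec_a_pow_simple_n; infer_instance

-- ===== CLAIM (what is proved, stated in full; the proofs are below) =====
def Claim_equal_a_pow_simple_n : Prop := ∀ (array : List Int), Dom_a_pow_simple_n array → Pre_a_pow_simple_n array → Spec_a_pow_simple_n array (a_pow_simple_n array)

-- ===== LEMMAS AND PROOFS =====

theorem pvBin_pos (m : Nat) (h : 0 < m) :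
    pvBin m = ((m % 2 == 1) :: pvBin (m / 2)) := by
  match m, h with
  | n + 1, _ => rw [pvBin]

theorem pvBin_len1 (m : Nat) (h : 1 ≤ m) : 1 ≤ (pvBin m).length := by
  rw [pvBin_pos m h]; simp

theorem pvBin_len2 (m : Nat) (h : 2 ≤ m) : 2 ≤ (pvBin m).length := by
  rw [pvBin_pos m (by omega)]
  have := pvBin_len1 (m / 2) (by omega)
  simp; omega

-- core step lemmas
theorem pvSymsCore_cons_false (t : List Bool) (h : 2 ≤ t.length) :
    pvSymsCore (false :: t) = 2 :: pvSymsCore t := by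
  obtain ⟨s, hs⟩ : ∃ s, t.length = s + 2 := ⟨t.length - 2, by omega⟩
  simp only [pvSymsCore, List.length_cons, hs]
  have h1 : s + 2 + 1 - 1 - 1 = s + 1 := by omega
  have h2 : s + 2 - 1 - 1 = s := by omega
  rw [h1, h2, List.range_succ_eq_map]
  simp only [List.flatMap_cons, List.flatMap_map]
  simp

theorem pvSymsCore_cons_true (t : List Bool) (h : 1 ≤ t.length) :
    pvSymsCore (true :: t) = 1 :: pvSymsCore (false :: t) := by
  rcases Nat.lt_or_ge t.length 2 with h2 | h2
  · obtain ⟨b, rfl⟩ : ∃ b, t = [b] := by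
      match t, h, h2 with
      | [b], _, _ => exact ⟨b, rfl⟩
    simp [pvSymsCore]
  · obtain ⟨s, hs⟩ : ∃ s, t.length = s + 2 := ⟨t.length - 2, by omega⟩
    simp only [pvSymsCore, List.length_cons, hs]
    have h1 : s + 2 + 1 - 1 - 1 = s + 1 := by omega
    rw [h1, List.range_succ_eq_map]
    simp only [List.flatMap_cons, List.flatMap_map]
    simp

-- bridge: for n ≥ 2 the ≤2 branch and the core agree
theorem pvSyms_eq_core (n : Int) (h : 2 ≤ n) :
    pvSyms n = pvSymsCore (pvBin n.toNat) := by
  rcases eq_or_lt_of_le h with h2 | h3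
  · subst h2
    have e0 : pvBin 0 = [] := by simp [pvBin]
    have e2 : pvBin 2 = [false, true] := by
      rw [pvBin_pos 2 (by norm_num), pvBin_pos 1 (by norm_num)]
      norm_num [e0]
    simp [pvSyms, pvSymsCore, e2]
  · simp [pvSyms, pvSymsCore, not_le.mpr h3]

-- step lemmas on pvSyms
theorem pvSyms_even (n : Int) (h3 : 3 ≤ n) (he : n % 2 = 0) :
    pvSyms n = 2 :: pvSyms (n / 2) := by
  have h4 : 4 ≤ n := by omega
  have hm : 4 ≤ n.toNat := by omega
  have hdiv : (n / 2).toNat = n.toNat / 2 := by omega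
  have hmod : n.toNat % 2 = 0 := by omega
  rw [pvSyms_eq_core n (by omega), pvSyms_eq_core (n / 2) (by omega), hdiv,
      pvBin_pos n.toNat (by omega), hmod]
  have hlen : 2 ≤ (pvBin (n.toNat / 2)).length := pvBin_len2 _ (by omega)
  simpa using pvSymsCore_cons_false (pvBin (n.toNat / 2)) hlen

theorem pvSyms_odd (n : Int) (h3 : 3 ≤ n) (ho : n % 2 = 1) :
    pvSyms n = 1 :: pvSyms (n - 1) := by
  have hm : 3 ≤ n.toNat := by omega
  have hmod : n.toNat % 2 = 1 := by omega
  have hpred : (n - 1).toNat = n.toNat - 1 := by omega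
  have hd : (n.toNat - 1) / 2 = n.toNat / 2 := by omega
  have hmod' : (n.toNat - 1) % 2 = 0 := by omega
  rw [pvSyms_eq_core n (by omega), pvSyms_eq_core (n - 1) (by omega), hpred,
      pvBin_pos n.toNat (by omega), pvBin_pos (n.toNat - 1) (by omega), hmod, hmod', hd]
  have hlen : 1 ≤ (pvBin (n.toNat / 2)).length := pvBin_len1 _ (by omega)
  simpa using pvSymsCore_cons_true (pvBin (n.toNat / 2)) hlen

-- With enough fuel (n ≤ f), A's while-loop body equals B's closed form.
theorem pvWhileA_eq_syms (f : Nat) :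
    ∀ (n : Int) (acc : List Int), 0 ≤ n → n ≤ (f : Int) →
      pvWhileA f n acc = acc ++ pvSyms n := by
  induction f with
  | zero =>
    intro n acc h0 hle
    have : n = 0 := le_antisymm (by exact_mod_cast hle) h0
    simp [pvWhileA, pvSyms, this]
  | succ f ih =>
    intro n acc h0 hle
    by_cases hb : n = 0 ∨ n = 1 ∨ n = 2
    · have hne : ¬ (n ≠ 0 ∧ n ≠ 1 ∧ n ≠ 2) := by tauto
      have hle2 : n ≤ 2 := by rcases hb with h | h | h <;> omega
      simp [pvWhileA, pvSyms, hne, hle2]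
    · have hne : n ≠ 0 ∧ n ≠ 1 ∧ n ≠ 2 := by tauto
      have h3 : 3 ≤ n := by omega
      have hmod : PySem.Int.mod n 2 = n % 2 := PySem.Int.mod_eq_emod_of_pos (by omega)
      have hdiv : PySem.Int.floordiv n 2 = n / 2 := PySem.Int.floordiv_eq_ediv_of_pos (by omega)
      by_cases he : PySem.Int.mod n 2 = 0
      · have he' : n % 2 = 0 := by rw [← hmod]; exact he
        have step : pvWhileA (f+1) n acc = pvWhileA f (PySem.Int.floordiv n 2) (acc ++ [2]) := by
          simp only [pvWhileA]; rw [if_pos hne, if_pos he]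
        rw [step, hdiv, ih (n / 2) (acc ++ [2]) (by omega) (by omega),
            pvSyms_even n h3 he']
        simp
      · have he' : n % 2 = 1 := by omega
        have step : pvWhileA (f+1) n acc = pvWhileA f (n - 1) (acc ++ [1]) := by
          simp only [pvWhileA]; rw [if_pos hne, if_neg he]
        rw [step, ih (n - 1) (acc ++ [1]) (by omega) (by omega), pvSyms_odd n h3 he']
        simp

theorem foldl_whileA_eq_flatMap (l : List Int) (acc : List Int)
    (h : ∀ x ∈ l, 0 ≤ x) :
    l.foldl (fun acc n => pvWhileA (n.toNat + 1) n acc) acc = acc ++ l.flatMap pvSyms := by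
  induction l generalizing acc with
  | nil => simp
  | cons x xs ih =>
    have hx : 0 ≤ x := h x (by simp)
    have hstep : pvWhileA (x.toNat + 1) x acc = acc ++ pvSyms x :=
      pvWhileA_eq_syms (x.toNat + 1) x acc hx (by omega)
    simp only [List.foldl_cons, hstep, List.flatMap_cons]
    rw [ih _ (fun y hy => h y (by simp [hy]))]
    simp

-- ===== VERDICT (by name: the statement is the Claim_ definition above) =====
theorem a_pow_simple_n_spec : Claim_equal_a_pow_simple_n := by
  intro array _ hpre
  obtain ⟨hne, htail⟩ := hpre
  match array, hne with
  | a0 :: rest, _ =>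
    show a_pow_simple_n (a0 :: rest) = a_pow_simple_n_alt (a0 :: rest)
    simp only [a_pow_simple_n, a_pow_simple_n_alt]
    rw [foldl_whileA_eq_flatMap rest [a0] (fun x hx => htail x (by simpa using hx))]
    simp
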